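-- pv_equiv track=rewrite | github.com/smesays/poker | table/powertable.py | cards_filter
-- ===== SOURCE A (Python) =====
-- def cards_filter(cards):
--     result = []
--     for card in cards:
--         if (card-1)%13 != 0:
--             result.append([(4 - int((card-1)/13)), (card-1)%13 + 1])
--         else:
--             result.append([(4 - int((card-1)/13)), 14])
--
--     result.sort(key = lambda i: (i[1], i[0]), reverse = False)
--     return [result[i][0] for i in range(len(result))], [result[i][1] for i in range(len(result))]
-- ===== SOURCE B (Python) =====
-- def cards_filter(cards):
--     # Bucket each card by its rank (2..14), then emit buckets in rank order
--     # with the suits sorted inside each bucket.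
--     buckets = [[] for _ in range(15)]
--     for card in cards:
--         m = (card - 1) % 13
--         rank = m + 1 if m else 14
--         buckets[rank].append(4 - int((card - 1) / 13))
--     suits, ranks = [], []
--     for r in range(2, 15):
--         for s in sorted(buckets[r]):
--             suits.append(s)
--             ranks.append(r)
--     return suits, ranks
-- ===== Notes on version B (the rewrite author's own statement) =====
-- stated objective: faster
-- what changed: B replaces A's build-then-global-sort-by-(rank,suit)-tuple with 13 rank buckets filled in one pass and emitted in rank order with suits sorted per bucket, removing the tuple-keyed global sort.
import Mathlib
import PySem

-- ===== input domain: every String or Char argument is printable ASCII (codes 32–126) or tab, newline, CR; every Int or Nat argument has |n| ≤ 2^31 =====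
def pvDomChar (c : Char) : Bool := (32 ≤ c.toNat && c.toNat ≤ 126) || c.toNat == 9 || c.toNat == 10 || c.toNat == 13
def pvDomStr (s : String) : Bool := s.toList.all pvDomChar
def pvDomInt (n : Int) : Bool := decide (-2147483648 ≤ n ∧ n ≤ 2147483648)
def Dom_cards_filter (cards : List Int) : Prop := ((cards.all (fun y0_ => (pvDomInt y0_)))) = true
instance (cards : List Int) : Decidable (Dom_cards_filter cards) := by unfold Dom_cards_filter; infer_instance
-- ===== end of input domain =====

-- B buckets cards by rank in one pass and emits buckets in rank order with suits
-- sorted per bucket, instead of A's build-then-global-sort by the (rank, suit) tuple key.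


-- ===== PORT A =====
-- 'int((card-1)/13)' is float division followed by int(): for |card| ≤ 2^31 the float
-- quotient's rounding error is < 2⁻²⁴ < 1/13, so it is EXACTLY truncating division Int.tdiv
-- (exact on the whole stated domain); '% 13' is Python's floor mod = PySem.Int.mod.
def cards_filter (cards : List Int) : List Int × List Int :=
  let result : List (Int × Int) :=
    cards.foldl (fun result card =>
      if PySem.Int.mod (card - 1) 13 ≠ 0 then
        result ++ [(4 - Int.tdiv (card - 1) 13, PySem.Int.mod (card - 1) 13 + 1)]
      else
        result ++ [(4 - Int.tdiv (card - 1) 13, 14)]) []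
  let sortedRes := PySem.List.sorted2 result (fun i => i.2) (fun i => i.1)
  (sortedRes.map (fun i => i.1), sortedRes.map (fun i => i.2))

-- ===== PORT B =====
-- B's 'int((card-1)/13)' is the same exact truncating division Int.tdiv (see the note on
-- port A); buckets[rank].append is List.set at index rank (rank is always in 2..14, so
-- within the 15-slot list).
-- B-side helper: the body of B's bucketing loop
def cfBucketStep (buckets : List (List Int)) (card : Int) : List (List Int) :=
  let m := PySem.Int.mod (card - 1) 13
  let rank := if m ≠ 0 then m + 1 else 14
  buckets.set rank.toNat ((buckets.getD rank.toNat []) ++ [4 - Int.tdiv (card - 1) 13])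

def cards_filter_alt (cards : List Int) : List Int × List Int :=
  let buckets : List (List Int) := cards.foldl cfBucketStep (List.replicate 15 [])
  (PySem.List.pyRange 2 15 1).foldl (fun p r =>
    (PySem.List.sorted (buckets.getD r.toNat []) (fun x => x)).foldl
      (fun p s => (p.1 ++ [s], p.2 ++ [r])) p) ([], [])

-- ===== PRECONDITION & SPEC =====
def Spec_cards_filter (cards : List Int) (out : List Int × List Int) : Prop := out = cards_filter_alt cards
instance (cards : List Int) (out : List Int × List Int) : Decidable (Spec_cards_filter cards out) := by unfold Spec_cards_filter; infer_instance

-- ===== CLAIM (what is proved, stated in full; the proofs are below) =====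
def Claim_equal_cards_filter : Prop := ∀ (cards : List Int), Dom_cards_filter cards → Spec_cards_filter cards (cards_filter cards)

-- ===== LEMMAS AND PROOFS =====

-- rank and suit of a card, and the pair A stores for it
def pvRank (c : Int) : Int :=
  if PySem.Int.mod (c - 1) 13 ≠ 0 then PySem.Int.mod (c - 1) 13 + 1 else 14
def pvSuit (c : Int) : Int := 4 - Int.tdiv (c - 1) 13
def pvF (c : Int) : Int × Int := (pvSuit c, pvRank c)
-- A's sort key: the (rank, suit) tuple, lexicographically
def pvKey (i : Int × Int) : Int ×ₗ Int := toLex (i.2, i.1)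
-- one rank bucket of B, already tagged with its rank
def pvChunk (cs : List Int) (r : Int) : List (Int × Int) :=
  (PySem.List.sorted ((cs.filter (fun c => pvRank c = r)).map pvSuit) (fun x => x)).map
    (fun s => (s, r))
-- the list both sides' outputs are the unzip of
def pvL (cs : List Int) : List (Int × Int) :=
  (PySem.List.pyRange 2 15 1).flatMap (pvChunk cs)

theorem pvRank_bounds (c : Int) : 2 ≤ pvRank c ∧ pvRank c ≤ 14 := by
  unfold pvRank
  rw [PySem.Int.mod_eq_emod_of_pos (by norm_num)]
  have h1 : 0 ≤ (c - 1) % 13 := Int.emod_nonneg _ (by norm_num)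
  have h2 : (c - 1) % 13 < 13 := Int.emod_lt_of_pos _ (by norm_num)
  split <;> omega

-- A's loop builds exactly cards.map pvF
theorem pv_foldA (cs : List Int) (acc : List (Int × Int)) :
    cs.foldl (fun result card =>
      if PySem.Int.mod (card - 1) 13 ≠ 0 then
        result ++ [(4 - Int.tdiv (card - 1) 13, PySem.Int.mod (card - 1) 13 + 1)]
      else
        result ++ [(4 - Int.tdiv (card - 1) 13, 14)]) acc = acc ++ cs.map pvF := by
  induction cs generalizing acc with
  | nil => simp
  | cons c cs ih =>
    simp only [List.foldl_cons, List.map_cons, ih]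
    unfold pvF pvRank pvSuit
    split <;> simp

-- A's tuple-key sort is the lexicographic-key sort
theorem pv_sorted2_eq (xs : List (Int × Int)) :
    PySem.List.sorted2 xs (fun i => i.2) (fun i => i.1) = PySem.List.sorted xs pvKey := by
  rw [PySem.List.sorted_eq_foldl_insertBy]
  show List.foldl _ [] xs = _
  congr 1
  funext acc x
  congr 1
  funext a b
  rw [if_neg Bool.false_ne_true, Bool.eq_iff_iff]
  simp only [Bool.or_eq_true, Bool.and_eq_true, Bool.not_eq_true', decide_eq_true_eq,
    decide_eq_false_iff_not, pvKey, Prod.Lex.lt_iff, ofLex_toLex]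
  omega

-- B's loop body, in terms of pvRank/pvSuit
theorem cfBucketStep_eq (b : List (List Int)) (c : Int) :
    cfBucketStep b c = b.set (pvRank c).toNat ((b.getD (pvRank c).toNat []) ++ [pvSuit c]) := by
  simp only [cfBucketStep]
  unfold pvRank pvSuit
  rfl

-- B's bucket loop: bucket j collects the suits of the cards of rank j, in card order
theorem pv_buckets (cs : List Int) (b : List (List Int)) (hb : b.length = 15) :
    ((cs.foldl cfBucketStep b).length = 15) ∧
    ∀ j : Nat, j < 15 →
    (cs.foldl cfBucketStep b).getD j []
      = b.getD j [] ++ ((cs.filter (fun c => (pvRank c).toNat = j)).map pvSuit) := by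
  induction cs generalizing b with
  | nil => exact ⟨hb, fun j hj => by simp⟩
  | cons c cs ih =>
    have hrb := pvRank_bounds c
    have hlt : (pvRank c).toNat < 15 := by omega
    have hb' : (b.set (pvRank c).toNat ((b.getD (pvRank c).toNat []) ++ [pvSuit c])).length = 15 := by
      simpa using hb
    obtain ⟨hlen, hget⟩ := ih _ hb'
    rw [List.foldl_cons, cfBucketStep_eq]
    refine ⟨hlen, fun j hj => ?_⟩
    rw [hget j hj]
    by_cases hjc : (pvRank c).toNat = j
    · subst hjc
      rw [List.getD_eq_getElem?_getD, List.getElem?_set_self (by omega), Option.getD_some]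
      simp [List.append_assoc]
    · rw [List.getD_eq_getElem?_getD, List.getElem?_set_ne hjc, ← List.getD_eq_getElem?_getD]
      simp [hjc]

-- inner append loop of B
theorem pv_inner (S : List Int) (r : Int) (p : List Int × List Int) :
    S.foldl (fun p s => (p.1 ++ [s], p.2 ++ [r])) p
      = (p.1 ++ S, p.2 ++ S.map (fun _ => r)) := by
  induction S generalizing p with
  | nil => simp
  | cons s S ih => simp [ih]

-- outer loop of B emits the flatMap of the tagged chunks, unzipped
theorem pv_outer (g : Int → List Int) (R : List Int) (p : List Int × List Int) :
    R.foldl (fun p r => (g r).foldl (fun p s => (p.1 ++ [s], p.2 ++ [r])) p) p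
      = (p.1 ++ R.flatMap g, p.2 ++ R.flatMap (fun r => List.replicate (g r).length r)) := by
  induction R generalizing p with
  | nil => simp
  | cons r R ih =>
    rw [List.foldl_cons, pv_inner, ih]
    simp

-- pvChunk is a permutation of the pvF-image of the rank-r cards
theorem pv_chunk_perm (cs : List Int) (r : Int) :
    (pvChunk cs r).Perm ((cs.filter (fun c => pvRank c = r)).map pvF) := by
  unfold pvChunk
  have h1 : ((cs.filter (fun c => pvRank c = r)).map pvSuit).map (fun s => (s, r))
      = (cs.filter (fun c => pvRank c = r)).map pvF := by
    rw [List.map_map]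
    refine List.map_congr_left (fun c hc => ?_)
    have := (List.mem_filter.mp hc).2
    simp only [decide_eq_true_eq] at this
    simp [pvF, this]
  calc ((PySem.List.sorted ((cs.filter (fun c => pvRank c = r)).map pvSuit) (fun x => x)).map
          (fun s => (s, r))).Perm
        (((cs.filter (fun c => pvRank c = r)).map pvSuit).map (fun s => (s, r))) :=
        (PySem.List.sorted_perm _ _ _).map _
    _ = (cs.filter (fun c => pvRank c = r)).map pvF := h1

-- a cons'd card lands in exactly its own rank bucket
theorem pv_flatMap_filter_cons (R : List Int) (hR : R.Nodup) (c : Int) (cs : List Int)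
    (hc : pvRank c ∈ R) :
    (R.flatMap (fun r => (c :: cs).filter (fun x => pvRank x = r))).Perm
      (c :: R.flatMap (fun r => cs.filter (fun x => pvRank x = r))) := by
  induction R with
  | nil => cases hc
  | cons r R ih =>
    simp only [List.flatMap_cons]
    rcases List.nodup_cons.mp hR with ⟨hrR, hRnd⟩
    by_cases hcr : pvRank c = r
    · have htail : R.flatMap (fun r => (c :: cs).filter (fun x => pvRank x = r))
          = R.flatMap (fun r => cs.filter (fun x => pvRank x = r)) := by
        refine List.flatMap_congr (fun r' hr' => ?_)
        have : pvRank c ≠ r' := fun h => hrR (by rw [← hcr, h]; exact hr')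
        simp [this]
      rw [htail, List.filter_cons]
      simp [hcr]
    · have hcR : pvRank c ∈ R := by
        rcases List.mem_cons.mp hc with h | h
        · exact absurd h hcr
        · exact h
      have hperm := ih hRnd hcR
      have e1 : (c :: cs).filter (fun x => pvRank x = r) = cs.filter (fun x => pvRank x = r) := by
        simp [hcr]
      rw [e1]
      exact ((hperm.append_left (cs.filter (fun x => pvRank x = r))).trans List.perm_middle)

-- partitioning cards by rank over all ranks 2..14 is a permutation of the cards
theorem pv_partition (cs : List Int) :
    ((PySem.List.pyRange 2 15 1).flatMap
      (fun r => cs.filter (fun x => pvRank x = r))).Perm cs := by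
  induction cs with
  | nil => simp
  | cons c cs ih =>
    have hR : (PySem.List.pyRange 2 15 1 : List Int) = [2,3,4,5,6,7,8,9,10,11,12,13,14] := by decide
    have hnd : (PySem.List.pyRange 2 15 1 : List Int).Nodup := by rw [hR]; decide
    have hc : pvRank c ∈ (PySem.List.pyRange 2 15 1 : List Int) := by
      have := pvRank_bounds c
      rw [hR]
      have h2 : pvRank c = 2 ∨ pvRank c = 3 ∨ pvRank c = 4 ∨ pvRank c = 5 ∨ pvRank c = 6 ∨
        pvRank c = 7 ∨ pvRank c = 8 ∨ pvRank c = 9 ∨ pvRank c = 10 ∨ pvRank c = 11 ∨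
        pvRank c = 12 ∨ pvRank c = 13 ∨ pvRank c = 14 := by omega
      simp only [List.mem_cons, List.not_mem_nil, or_false]
      tauto
    exact (pv_flatMap_filter_cons _ hnd c cs hc).trans (ih.cons c)

theorem pv_L_perm (cs : List Int) : (pvL cs).Perm (cs.map pvF) := by
  unfold pvL
  have h1 : ((PySem.List.pyRange 2 15 1).flatMap (pvChunk cs)).Perm
      ((PySem.List.pyRange 2 15 1).flatMap
        (fun r => (cs.filter (fun c => pvRank c = r)).map pvF)) := by
    induction (PySem.List.pyRange 2 15 1 : List Int) with
    | nil => rfl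
    | cons r R ih => simpa using (pv_chunk_perm cs r).append ih
  have h2 : (PySem.List.pyRange 2 15 1).flatMap
        (fun r => (cs.filter (fun c => pvRank c = r)).map pvF)
      = ((PySem.List.pyRange 2 15 1).flatMap
        (fun r => cs.filter (fun c => pvRank c = r))).map pvF := by
    rw [List.map_flatMap]
  exact h1.trans (h2 ▸ (pv_partition cs).map pvF)

-- every element of pvChunk cs r has second component r
theorem pv_chunk_snd {cs : List Int} {r : Int} {x : Int × Int} (hx : x ∈ pvChunk cs r) :
    x.2 = r := by
  unfold pvChunk at hx
  rcases List.mem_map.mp hx with ⟨s, _, rfl⟩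
  rfl

theorem pv_L_pairwise (cs : List Int) :
    (pvL cs).Pairwise (fun a b => pvKey a ≤ pvKey b) := by
  unfold pvL
  have hstep : ∀ R : List Int, R.Pairwise (· < ·) →
      (R.flatMap (pvChunk cs)).Pairwise (fun a b => pvKey a ≤ pvKey b) := by
    intro R hR
    induction R with
    | nil => simp
    | cons r R ih =>
      rcases List.pairwise_cons.mp hR with ⟨hrlt, hRp⟩
      simp only [List.flatMap_cons]
      rw [List.pairwise_append]
      refine ⟨?_, ih hRp, ?_⟩
      · unfold pvChunk
        rw [List.pairwise_map]
        have := PySem.List.sorted_pairwise ((cs.filter (fun c => pvRank c = r)).map pvSuit)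
          (fun x => x)
        refine this.imp (fun {a b} hab => ?_)
        unfold pvKey
        rw [Prod.Lex.le_iff]
        exact Or.inr ⟨rfl, hab⟩
      · intro a ha b hb
        rcases List.mem_flatMap.mp hb with ⟨r', hr', hb'⟩
        have har : a.2 = r := pv_chunk_snd ha
        have hbr : b.2 = r' := pv_chunk_snd hb'
        unfold pvKey
        rw [Prod.Lex.le_iff]
        exact Or.inl (by simpa [har, hbr] using hrlt r' hr')
  refine hstep _ ?_
  have hR : (PySem.List.pyRange 2 15 1 : List Int) = [2,3,4,5,6,7,8,9,10,11,12,13,14] := by decide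
  rw [hR]; decide

theorem pvKey_injective : Function.Injective pvKey := by
  intro a b h
  unfold pvKey at h
  have h' : ((a.2, a.1) : Int × Int) = (b.2, b.1) := congrArg ofLex h
  have h1 : a.2 = b.2 := congrArg Prod.fst h'
  have h2 : a.1 = b.1 := congrArg Prod.snd h'
  exact Prod.ext h2 h1

-- the central identity: A's sorted list IS B's concatenation of rank buckets
theorem pv_sorted_eq_L (cs : List Int) :
    PySem.List.sorted (cs.map pvF) pvKey = pvL cs := by
  refine PySem.List.eq_of_perm_of_pairwise_le_of_injective pvKey pvKey_injective
    ?_ ?_ (pv_L_pairwise cs)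
  · exact (PySem.List.sorted_perm _ _ _).trans (pv_L_perm cs).symm
  · exact PySem.List.sorted_pairwise _ _

-- ===== VERDICT (by name: the statement is the Claim_ definition above) =====
theorem cards_filter_spec : Claim_equal_cards_filter := by
  intro cards _
  unfold Spec_cards_filter
  simp only [cards_filter, cards_filter_alt]
  rw [pv_foldA cards [], List.nil_append, pv_sorted2_eq, pv_sorted_eq_L,
    pv_outer (fun r => PySem.List.sorted
      ((cards.foldl cfBucketStep (List.replicate 15 [])).getD r.toNat []) (fun x => x))]
  simp only [List.nil_append]
  obtain ⟨hlen, hget⟩ := pv_buckets cards (List.replicate 15 []) (by simp)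
  have hchunk : ∀ r ∈ (PySem.List.pyRange 2 15 1 : List Int),
      PySem.List.sorted ((cards.foldl cfBucketStep (List.replicate 15 [])).getD r.toNat [])
        (fun x => x) = (pvChunk cards r).map Prod.fst := by
    intro r hr
    have hRr : (2:Int) ≤ r ∧ r ≤ 14 := by
      have hR : (PySem.List.pyRange 2 15 1 : List Int) = [2,3,4,5,6,7,8,9,10,11,12,13,14] := by
        decide
      rw [hR] at hr
      simp only [List.mem_cons, List.not_mem_nil, or_false] at hr
      rcases hr with h|h|h|h|h|h|h|h|h|h|h|h|h <;> omega
    have hj : r.toNat < 15 := by omega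
    rw [hget r.toNat hj]
    have hfilter : (cards.filter (fun c => (pvRank c).toNat = r.toNat))
        = cards.filter (fun c => pvRank c = r) := by
      refine List.filter_congr (fun c _ => ?_)
      have := pvRank_bounds c
      simp only [decide_eq_decide]
      omega
    have hrep : ((List.replicate 15 ([] : List Int)).getD r.toNat []) = [] := by
      rw [List.getD_eq_getElem?_getD, List.getElem?_replicate, if_pos hj, Option.getD_some]
    rw [hrep, List.nil_append, hfilter]
    unfold pvChunk
    rw [List.map_map]
    exact (List.map_id _).symm
  rw [Prod.mk.injEq]
  refine ⟨?_, ?_⟩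
  · unfold pvL
    rw [List.map_flatMap]
    exact (List.flatMap_congr (fun r hr => (hchunk r hr))).symm
  · unfold pvL
    rw [List.map_flatMap]
    refine (List.flatMap_congr (fun r hr => ?_)).symm
    rw [hchunk r hr]
    have hsnd : ∀ x ∈ pvChunk cards r, Prod.snd x = r := fun x hx => pv_chunk_snd hx
    calc List.replicate ((pvChunk cards r).map Prod.fst).length r
        = (pvChunk cards r).map (fun _ => r) := by
          rw [List.map_const', List.length_map]
      _ = (pvChunk cards r).map Prod.snd := by
          exact (List.map_congr_left (fun x hx => (hsnd x hx).symm))
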